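-- pv_equiv track=rewrite | github.com/leandrou-technology-forward/restapi_server | ganimides_server/ganimides_openBankingAPI/_onlineApp/_utilities.py | string_macro_enabled
-- ===== SOURCE A (Python) =====
-- def string_macro_enabled(String, dictionary={}):
--     thisString = str(String)
--     slen = len(thisString)
--     if slen <= 0:
--         return thisString
--     inmacro = False
--     thatString=''
--     for i in range(0, slen, +1):
--         if thisString[i] == '#':
--             inmacro = not inmacro
--             thatString = thatString+thisString[i]
--         else:
--             if inmacro:
--                 #thisString[i] = thisString[i].upper()
--                 thatString = thatString+thisString[i].upper()
--             else:
--                 thatString = thatString + thisString[i]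
--     return thatString
-- ===== SOURCE B (Python) =====
-- def string_macro_enabled(String, dictionary={}):
--     # Split on '#': odd-indexed segments lie between delimiters, so uppercase those and rejoin.
--     parts = str(String).split('#')
--     out = []
--     for i, p in enumerate(parts):
--         out.append(p.upper() if i % 2 == 1 else p)
--     return '#'.join(out)
-- ===== Notes on version B (the rewrite author's own statement) =====
-- stated objective: simpler
-- what changed: Replaces the char-by-char scan with a toggling in-macro flag by splitting the string on the delimiter, uppercasing the odd-indexed segments, and rejoining; segment-level str.upper and str.join avoid per-character string concatenation.
import Mathlib
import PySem

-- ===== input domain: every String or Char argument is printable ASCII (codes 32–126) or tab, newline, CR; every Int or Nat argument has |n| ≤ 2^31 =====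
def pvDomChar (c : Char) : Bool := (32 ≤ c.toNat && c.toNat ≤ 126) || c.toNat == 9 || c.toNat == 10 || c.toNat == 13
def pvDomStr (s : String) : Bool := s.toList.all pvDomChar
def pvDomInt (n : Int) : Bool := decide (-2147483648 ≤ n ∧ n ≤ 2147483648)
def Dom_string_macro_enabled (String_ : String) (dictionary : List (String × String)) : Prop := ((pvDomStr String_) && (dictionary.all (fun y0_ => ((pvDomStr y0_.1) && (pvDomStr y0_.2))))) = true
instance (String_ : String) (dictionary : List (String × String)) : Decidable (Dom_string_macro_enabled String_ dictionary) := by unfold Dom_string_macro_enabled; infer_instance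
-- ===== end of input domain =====

-- B replaces A's char-by-char toggle scan with split-on-delimiter / uppercase odd segments / rejoin (simpler; measured faster in a timing run).


-- ===== PORT A =====
def string_macro_enabled (String_ : String) (dictionary : List (String × String)) : String :=
  let thisString := String_.toList
  let slen := PySem.Chars.len thisString
  if slen ≤ 0 then String_
  else
    let r := (PySem.List.pyRange 0 (slen : Int) 1).foldl
      (fun (st : Bool × List Char) i =>
        let c := PySem.List.pyGetD thisString i ' '
        if c == '#' then (!st.1, st.2 ++ [c])
        else if st.1 then (st.1, st.2 ++ [PySem.Chars.upperChar c])
        else (st.1, st.2 ++ [c]))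
      (false, [])
    String.ofList r.2

-- ===== PORT B =====
def string_macro_enabled_alt (String_ : String) (dictionary : List (String × String)) : String :=
  let parts := PySem.Chars.splitOn String_.toList ['#']
  let out := (PySem.List.enumerate parts 0).map
    (fun ip => if PySem.Int.mod ip.1 2 == 1 then PySem.Chars.upper ip.2 else ip.2)
  String.ofList (PySem.Chars.join ['#'] out)

-- ===== PRECONDITION & SPEC =====
def Spec_string_macro_enabled (String_ : String) (dictionary : List (String × String)) (out : String) : Prop := out = string_macro_enabled_alt String_ dictionary
instance (String_ : String) (dictionary : List (String × String)) (out : String) : Decidable (Spec_string_macro_enabled String_ dictionary out) := by unfold Spec_string_macro_enabled; infer_instance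

-- ===== CLAIM (what is proved, stated in full; the proofs are below) =====
def Claim_equal_string_macro_enabled : Prop := ∀ (String_ : String) (dictionary : List (String × String)), Dom_string_macro_enabled String_ dictionary → Spec_string_macro_enabled String_ dictionary (string_macro_enabled String_ dictionary)

-- ===== LEMMAS AND PROOFS =====
def pvSpl : List Char → List (List Char)
  | [] => [[]]
  | c :: cs => if c = '#' then [] :: pvSpl cs else (pvSpl cs).modifyHead (c :: ·)

lemma pvSplitOn_go_spec (fuel : Nat) (cs cur : List Char) (accs : List (List Char))
    (h : cs.length < fuel) :
    PySem.Chars.splitOn.go ['#'] fuel cs cur accs =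
      accs.reverse ++ (pvSpl cs).modifyHead (cur.reverse ++ ·) := by
  induction fuel generalizing cs cur accs with
  | zero => omega
  | succ f ih =>
    cases cs with
    | nil => simp [PySem.Chars.splitOn.go, pvSpl]
    | cons c rest =>
      by_cases hc : c = '#'
      · subst hc
        rw [show PySem.Chars.splitOn.go ['#'] (f+1) ('#' :: rest) cur accs
            = PySem.Chars.splitOn.go ['#'] f rest [] (cur.reverse :: accs) from by
          simp [PySem.Chars.splitOn.go, List.isPrefixOf]]
        rw [ih rest [] (cur.reverse :: accs) (by simpa using h)]
        simp only [pvSpl, List.modifyHead]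
        cases pvSpl rest <;> simp
      · rw [show PySem.Chars.splitOn.go ['#'] (f+1) (c :: rest) cur accs
            = PySem.Chars.splitOn.go ['#'] f rest (c :: cur) accs from by
          simp [PySem.Chars.splitOn.go, List.isPrefixOf, Ne.symm hc]]
        rw [ih rest (c :: cur) accs (by simpa using h)]
        simp only [pvSpl, if_neg hc, List.modifyHead_modifyHead]
        congr 2
        funext x
        simp

lemma pvSplitOn_eq_spl (cs : List Char) :
    PySem.Chars.splitOn cs ['#'] = pvSpl cs := by
  rw [show PySem.Chars.splitOn cs ['#'] = PySem.Chars.splitOn.go ['#'] (cs.length + 1) cs [] [] from rfl,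
      pvSplitOn_go_spec (cs.length + 1) cs [] [] (by omega)]
  simp
  cases pvSpl cs <;> simp

def pvAltUp : Bool → List (List Char) → List (List Char)
  | _, [] => []
  | b, p :: ps => (if b then PySem.Chars.upper p else p) :: pvAltUp (!b) ps

lemma pvSpl_ne_nil (cs : List Char) : pvSpl cs ≠ [] := by
  cases cs with
  | nil => simp [pvSpl]
  | cons c cs =>
    simp only [pvSpl]
    split
    · simp
    · cases h : pvSpl cs with
      | nil => exact absurd h (pvSpl_ne_nil cs)
      | cons q qs => simp

lemma pvJoin_cons_head (sep : List Char) (c : Char) (hd : List Char) (t : List (List Char)) :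
    PySem.Chars.join sep ((c :: hd) :: t) = c :: PySem.Chars.join sep (hd :: t) := by
  cases t with
  | nil => rw [PySem.Chars.join_singleton, PySem.Chars.join_singleton]
  | cons y t => rw [PySem.Chars.join_cons_cons, PySem.Chars.join_cons_cons]; simp

lemma pvLoop (cs : List Char) (b : Bool) (acc : List Char) :
    (cs.foldl
      (fun (st : Bool × List Char) c =>
        if c == '#' then (!st.1, st.2 ++ [c])
        else if st.1 then (st.1, st.2 ++ [PySem.Chars.upperChar c])
        else (st.1, st.2 ++ [c]))
      (b, acc)).2 = acc ++ PySem.Chars.join ['#'] (pvAltUp b (pvSpl cs)) := by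
  induction cs generalizing b acc with
  | nil => cases b <;> simp [pvSpl, pvAltUp, PySem.Chars.join, PySem.Chars.upper, List.intercalate]
  | cons c rest ih =>
    by_cases hc : c = '#'
    · subst hc
      simp only [List.foldl_cons, beq_self_eq_true, if_pos]
      rw [ih]
      simp only [pvSpl]
      obtain ⟨q, qs, hq⟩ := List.exists_cons_of_ne_nil (pvSpl_ne_nil rest)
      simp only [if_true]
      rw [hq]
      simp only [pvAltUp]
      rw [PySem.Chars.join_cons_cons]
      cases b <;> simp [pvAltUp, PySem.Chars.upper]
    · have hbeq : (c == '#') = false := by simpa using hc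
      simp only [List.foldl_cons, hbeq, Bool.false_eq_true, if_false]
      cases b with
      | false =>
        simp only [Bool.false_eq_true, if_false]
        rw [ih]
        obtain ⟨q, qs, hq⟩ := List.exists_cons_of_ne_nil (pvSpl_ne_nil rest)
        simp only [pvSpl, if_neg hc, hq, List.modifyHead, pvAltUp, Bool.not_false,
          Bool.false_eq_true, if_false]
        rw [pvJoin_cons_head]
        simp
      | true =>
        simp only [if_pos]
        rw [ih]
        obtain ⟨q, qs, hq⟩ := List.exists_cons_of_ne_nil (pvSpl_ne_nil rest)
        simp only [pvSpl, if_neg hc, hq, List.modifyHead, pvAltUp, Bool.not_true, if_pos,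
          PySem.Chars.upper, List.map_cons]
        rw [pvJoin_cons_head]
        simp

lemma pvEnum (parts : List (List Char)) (n : Nat) :
    (PySem.List.enumerate parts (n : Int)).map
      (fun ip => if PySem.Int.mod ip.1 2 == 1 then PySem.Chars.upper ip.2 else ip.2)
      = pvAltUp (n % 2 == 1) parts := by
  induction parts generalizing n with
  | nil => simp [pvAltUp]
  | cons p ps ih =>
    rw [PySem.List.enumerate_cons, List.map_cons]
    have h1 : ((n : Int) + 1) = ((n + 1 : Nat) : Int) := by push_cast; ring
    rw [h1, ih (n + 1)]
    have h2 : PySem.Int.mod (n : Int) 2 = ((n % 2 : Nat) : Int) := PySem.Int.mod_natCast n 2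
    have h3 : ((n + 1) % 2 == 1) = !(n % 2 == 1) := by
      rcases Nat.mod_two_eq_zero_or_one n with h | h <;> simp [Nat.add_mod, h]
    simp only [pvAltUp, h2, h3]
    congr 1
    rcases Nat.mod_two_eq_zero_or_one n with h | h <;> simp [h]

lemma pvAlt_eval (s : String) :
    string_macro_enabled_alt s [] =
      String.ofList (PySem.Chars.join ['#'] (pvAltUp false (pvSpl s.toList))) := by
  simp only [string_macro_enabled_alt]
  rw [pvSplitOn_eq_spl]
  rw [show ((0 : Int)) = ((0 : Nat) : Int) from rfl, pvEnum (pvSpl s.toList) 0]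
  rfl

lemma pvMain (s : String) (d : List (String × String)) :
    string_macro_enabled s d = string_macro_enabled_alt s d := by
  have halt : string_macro_enabled_alt s d = string_macro_enabled_alt s [] := rfl
  have ha : string_macro_enabled s d = string_macro_enabled s [] := rfl
  rw [halt, ha, pvAlt_eval]
  unfold string_macro_enabled
  by_cases h : s.toList = []
  · rw [h]
    simp only [PySem.Chars.len_eq, List.length_nil, Nat.cast_zero, le_refl, if_pos]
    have : s = "" := String.toList_inj.mp (by simp [h])
    subst this
    rfl
  · have hlen : ¬ (PySem.Chars.len s.toList ≤ 0) := by
      simp only [PySem.Chars.len_eq]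
      have := List.length_pos_of_ne_nil h
      omega
    rw [if_neg hlen]
    simp only [PySem.Chars.len_eq]
    rw [PySem.List.foldl_pyRange_zero_pyGetD' s.toList ' '
      (fun (st : Bool × List Char) c =>
        if c == '#' then (!st.1, st.2 ++ [c])
        else if st.1 then (st.1, st.2 ++ [PySem.Chars.upperChar c])
        else (st.1, st.2 ++ [c])) (false, [])]
    rw [pvLoop s.toList false []]
    simp

-- ===== VERDICT (by name: the statement is the Claim_ definition above) =====
theorem string_macro_enabled_spec : Claim_equal_string_macro_enabled := by
  intro s d _
  unfold Spec_string_macro_enabled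
  exact pvMain s d
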